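-- pv_equiv track=rewrite | github.com/marco11235813/Python-Practice | Retos_semanales_2023/reto_8/sebasMora/reto_8.py | logica
-- ===== SOURCE A (Python) =====
-- def logica(resultados):
--     casas = {
--         0: "Gryffindor",
--         1: "Slytherin",
--         2: "Hufflepuff",
--         3: "Ravenclaw"
--     }
--
--     contador_0 = 0
--     contador_1 = 0
--     contador_2 = 0
--     contador_3 = 0
--
--     for resultado in resultados:
--         if resultado == 0:
--             contador_0 += 1
--         elif resultado == 1:
--             contador_1 += 1
--         elif resultado == 2:
--             contador_2 += 1
--         elif resultado == 3:
--             contador_3 += 1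
--
--     contadores = [contador_0, contador_1, contador_2, contador_3]
--     casa = max(contadores)
--
--     return casas[contadores.index(casa)]
-- ===== SOURCE B (Python) =====
-- def logica(resultados):
--     casas = ["Gryffindor", "Slytherin", "Hufflepuff", "Ravenclaw"]
--     votos = sorted(v for v in resultados if 0 <= v <= 3)
--     mejor, mejor_len = 0, 0
--     actual, actual_len = None, 0
--     for v in votos:
--         if v == actual:
--             actual_len += 1
--         else:
--             actual, actual_len = v, 1
--         if actual_len > mejor_len:
--             mejor, mejor_len = v, actual_len
--     return casas[mejor]
-- ===== Notes on version B (the rewrite author's own statement) =====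
-- stated objective: alternative
-- what changed: Replaces A's one-pass four-counter histogram with max/.index/dict tail by a sort-based algorithm: B sorts the votes in 0..3 and scans runs of equal values keeping the longest run, where the strict '>' update reproduces A's first-max (smallest house index) tie-break.
import Mathlib
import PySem

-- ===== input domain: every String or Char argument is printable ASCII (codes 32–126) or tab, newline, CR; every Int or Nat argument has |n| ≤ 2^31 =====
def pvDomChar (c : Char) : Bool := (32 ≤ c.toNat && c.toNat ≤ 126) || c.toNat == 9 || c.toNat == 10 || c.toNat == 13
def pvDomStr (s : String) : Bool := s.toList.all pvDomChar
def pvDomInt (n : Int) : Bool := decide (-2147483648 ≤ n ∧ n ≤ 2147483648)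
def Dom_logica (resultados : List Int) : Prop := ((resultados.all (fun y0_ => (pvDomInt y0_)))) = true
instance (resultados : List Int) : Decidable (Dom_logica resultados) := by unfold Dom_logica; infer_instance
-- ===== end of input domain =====

-- B replaces A's four-counter histogram + max/.index/dict tail by a different algorithm: sort the valid votes and keep the longest run (ties to the smaller value); objective: alternative (not faster).


-- ===== PORT A =====
-- literal transliteration of A: house dict, four counters in one fold with the if/elif chain,
-- then max / .index / dict lookup. The `""` fallbacks are unreachable (contadores always has
-- 4 elements, so max?/index? return some, and the index 0..3 is a key of the dict).
def logica (resultados : List Int) : String :=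
  let casas : PySem.Dict Int String :=
    ((((PySem.Dict.empty).insert 0 "Gryffindor").insert 1 "Slytherin").insert 2 "Hufflepuff").insert 3 "Ravenclaw"
  let cs := resultados.foldl (fun (c : Int × Int × Int × Int) resultado =>
      if resultado == 0 then (c.1 + 1, c.2.1, c.2.2.1, c.2.2.2)
      else if resultado == 1 then (c.1, c.2.1 + 1, c.2.2.1, c.2.2.2)
      else if resultado == 2 then (c.1, c.2.1, c.2.2.1 + 1, c.2.2.2)
      else if resultado == 3 then (c.1, c.2.1, c.2.2.1, c.2.2.2 + 1)
      else c) (0, 0, 0, 0)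
  let contadores : List Int := [cs.1, cs.2.1, cs.2.2.1, cs.2.2.2]
  match PySem.List.max? contadores (fun x => x) with
  | none => ""
  | some casa =>
    match PySem.List.index? contadores casa with
    | none => ""
    | some i => (casas.get? (i : Int)).getD ""

-- ===== PORT B =====
-- B-side helper: the body of B's for-loop over the sorted votes; state is
-- (mejor, mejor_len, actual, actual_len), actual being None before the first vote.
def pvStep (s : Int × Int × Option Int × Int) (v : Int) : Int × Int × Option Int × Int :=
  let p : Option Int × Int := if s.2.2.1 == some v then (s.2.2.1, s.2.2.2 + 1) else (some v, 1)
  if p.2 > s.2.1 then (v, p.2, p.1, p.2) else (s.1, s.2.1, p.1, p.2)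

-- literal transliteration of B: sort the votes in 0..3, scan runs keeping the longest one
-- (strict '>' keeps the first, i.e. smallest, value on ties), then index the house list.
-- The `""` default of pyGetD is unreachable (mejor stays in 0..3).
def logica_alt (resultados : List Int) : String :=
  let casas : List String := ["Gryffindor", "Slytherin", "Hufflepuff", "Ravenclaw"]
  let votos := PySem.List.sorted (resultados.filter (fun v => decide (0 ≤ v) && decide (v ≤ 3))) (fun x => x) false
  let st := votos.foldl pvStep ((0 : Int), (0 : Int), (none : Option Int), (0 : Int))
  PySem.List.pyGetD casas st.1 ""

-- ===== PRECONDITION & SPEC =====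
def Spec_logica (resultados : List Int) (out : String) : Prop := out = logica_alt resultados
instance (resultados : List Int) (out : String) : Decidable (Spec_logica resultados out) := by unfold Spec_logica; infer_instance

-- ===== CLAIM (what is proved, stated in full; the proofs are below) =====
def Claim_equal_logica : Prop := ∀ (resultados : List Int), Dom_logica resultados → Spec_logica resultados (logica resultados)

-- ===== LEMMAS AND PROOFS =====

-- A's counting fold computes the four counts.
theorem logica_fold_counts (l : List Int) (a b c d : Int) :
    l.foldl (fun (c : Int × Int × Int × Int) resultado =>
      if resultado == 0 then (c.1 + 1, c.2.1, c.2.2.1, c.2.2.2)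
      else if resultado == 1 then (c.1, c.2.1 + 1, c.2.2.1, c.2.2.2)
      else if resultado == 2 then (c.1, c.2.1, c.2.2.1 + 1, c.2.2.2)
      else if resultado == 3 then (c.1, c.2.1, c.2.2.1, c.2.2.2 + 1)
      else c) (a, b, c, d)
    = (a + l.count 0, b + l.count 1, c + l.count 2, d + l.count 3) := by
  induction l generalizing a b c d with
  | nil => simp
  | cons x t ih =>
    rw [List.foldl_cons]
    by_cases h0 : x = 0
    · subst h0
      rw [if_pos (by decide : (((0:Int) == 0) = true))]
      rw [ih]
      simp only [List.count_cons, Prod.mk.injEq]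
      refine ⟨?_, ?_, ?_, ?_⟩ <;> (simp; try omega)
    · rw [if_neg (by simp [h0] : ¬ ((x == 0) = true))]
      by_cases h1 : x = 1
      · subst h1
        rw [if_pos (by decide : (((1:Int) == 1) = true))]
        rw [ih]
        simp only [List.count_cons, Prod.mk.injEq]
        refine ⟨?_, ?_, ?_, ?_⟩ <;> (simp; try omega)
      · rw [if_neg (by simp [h1] : ¬ ((x == 1) = true))]
        by_cases h2 : x = 2
        · subst h2
          rw [if_pos (by decide : (((2:Int) == 2) = true))]
          rw [ih]
          simp only [List.count_cons, Prod.mk.injEq]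
          refine ⟨?_, ?_, ?_, ?_⟩ <;> (simp; try omega)
        · rw [if_neg (by simp [h2] : ¬ ((x == 2) = true))]
          by_cases h3 : x = 3
          · subst h3
            rw [if_pos (by decide : (((3:Int) == 3) = true))]
            rw [ih]
            simp only [List.count_cons, Prod.mk.injEq]
            refine ⟨?_, ?_, ?_, ?_⟩ <;> (simp; try omega)
          · rw [if_neg (by simp [h3] : ¬ ((x == 3) = true))]
            rw [ih]
            simp only [List.count_cons, Prod.mk.injEq]
            refine ⟨?_, ?_, ?_, ?_⟩ <;> simp [h0, h1, h2, h3]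

-- sorted(filter 0..3) is the four constant blocks, one per vote value.
theorem sorted_filter_blocks (l : List Int) :
    PySem.List.sorted (l.filter (fun v => decide (0 ≤ v) && decide (v ≤ 3))) (fun x => x) false
    = List.replicate (l.count 0) 0 ++ List.replicate (l.count 1) 1 ++
      List.replicate (l.count 2) 2 ++ List.replicate (l.count 3) 3 := by
  apply PySem.List.sorted_id_eq_of_perm_of_pairwise
  · rw [List.perm_iff_count]
    intro a
    simp only [List.count_append, List.count_replicate, beq_iff_eq]
    by_cases ha : 0 ≤ a ∧ a ≤ 3
    · rw [List.count_filter (by simp [ha.1, ha.2])]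
      obtain ⟨h1, h2⟩ := ha
      interval_cases a <;> simp
    · have hz : (l.filter (fun v => decide (0 ≤ v) && decide (v ≤ 3))).count a = 0 := by
        rw [List.count_eq_zero]
        intro hmem
        have := List.of_mem_filter hmem
        simp at this
        omega
      rw [hz]
      split_ifs <;> omega
  · simp only [List.pairwise_append]
    refine ⟨⟨⟨List.pairwise_replicate_of_refl, List.pairwise_replicate_of_refl, ?_⟩,
      List.pairwise_replicate_of_refl, ?_⟩, List.pairwise_replicate_of_refl, ?_⟩ <;>
    · intro x hx y hy
      simp only [List.mem_append, List.mem_replicate] at hx hy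
      omega

-- B's run scan over one constant block, from a state whose current run is not v.
theorem foldl_step_replicate (n : Nat) (v mejor mlen : Int) (actual : Option Int) (alen : Int)
    (hne : actual ≠ some v) (h0 : 0 ≤ mlen) :
    (List.replicate n v).foldl pvStep (mejor, mlen, actual, alen)
    = (if (n : Int) > mlen then v else mejor, max (n : Int) mlen,
       if n = 0 then actual else some v, if n = 0 then alen else (n : Int)) := by
  have inner : ∀ (m : Nat) (mj ml al : Int), al ≤ ml →
      (List.replicate m v).foldl pvStep (mj, ml, some v, al)
      = (if al + m > ml then v else mj, max (al + m) ml, some v, al + m) := by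
    intro m
    induction m with
    | zero =>
      intro mj ml al h
      simp only [List.replicate_zero, List.foldl_nil]
      rw [if_neg (by omega)]
      have : max (al + (0:Nat)) ml = ml := by omega
      rw [this]
      simp
    | succ k ih =>
      intro mj ml al h
      rw [List.replicate_succ, List.foldl_cons]
      have hstep : pvStep (mj, ml, some v, al) v
          = if al + 1 > ml then (v, al + 1, some v, al + 1) else (mj, ml, some v, al + 1) := by
        simp [pvStep]
      rw [hstep]
      by_cases hc : al + 1 > ml
      · rw [if_pos hc, ih _ _ _ (le_refl _)]
        simp only [Prod.mk.injEq]
        refine ⟨?_, ?_, trivial, ?_⟩ <;> [skip; omega; omega]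
        split_ifs <;> omega
      · rw [if_neg hc, ih _ _ _ (by omega)]
        simp only [Prod.mk.injEq]
        refine ⟨?_, ?_, trivial, ?_⟩ <;> [skip; omega; omega]
        split_ifs <;> omega
  cases n with
  | zero =>
    simp only [List.replicate_zero, List.foldl_nil]
    rw [if_neg (by omega)]
    have : max ((0:Nat) : Int) mlen = mlen := by omega
    rw [this]
    simp
  | succ k =>
    rw [List.replicate_succ, List.foldl_cons]
    have hb : (actual == some v) = false := by
      simpa using hne
    have hstep : pvStep (mejor, mlen, actual, alen) v
        = if 1 > mlen then (v, 1, some v, 1) else (mejor, mlen, some v, 1) := by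
      simp [pvStep, hb]
    rw [hstep]
    by_cases hc : (1:Int) > mlen
    · rw [if_pos hc, inner _ _ _ _ (le_refl _)]
      simp only [Prod.mk.injEq, Nat.succ_ne_zero, if_false]
      refine ⟨?_, ?_, trivial, ?_⟩ <;> [skip; omega; omega]
      split_ifs <;> omega
    · rw [if_neg hc, inner _ _ _ _ (by omega)]
      simp only [Prod.mk.injEq, Nat.succ_ne_zero, if_false]
      refine ⟨?_, ?_, trivial, ?_⟩ <;> [skip; omega; omega]
      split_ifs <;> omega

-- the winning-run value of B's scan over the four blocks, as nested comparisons of the counts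
theorem blocks_fst (c0 c1 c2 c3 : Nat) :
    ((List.replicate c0 (0:Int) ++ List.replicate c1 1 ++ List.replicate c2 2 ++ List.replicate c3 3).foldl
      pvStep ((0:Int), (0:Int), (none : Option Int), (0:Int))).1
    = (if (c3:Int) > max (c2:Int) (max (c1:Int) (c0:Int)) then 3
       else if (c2:Int) > max (c1:Int) (c0:Int) then 2
       else if (c1:Int) > (c0:Int) then 1 else 0) := by
  rw [List.foldl_append, List.foldl_append, List.foldl_append]
  rw [foldl_step_replicate c0 0 _ _ _ _ (by simp) (by omega)]
  rw [foldl_step_replicate c1 1 _ _ _ _ (by split_ifs <;> simp) (by omega)]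
  rw [foldl_step_replicate c2 2 _ _ _ _ (by split_ifs <;> simp) (by positivity)]
  rw [foldl_step_replicate c3 3 _ _ _ _ (by split_ifs <;> simp) (by positivity)]
  have h00 : max ((c0:Int)) 0 = (c0:Int) := by omega
  simp only [gt_iff_lt, h00]
  split_ifs <;> omega

-- A's max/.index/dict tail equals indexing the house list with B's nested-comparison winner.
theorem tail_eq (a b c d : Int) :
    (match PySem.List.max? [a, b, c, d] (fun x => x) with
     | none => ""
     | some casa =>
       match PySem.List.index? [a, b, c, d] casa with
       | none => ""
       | some i => ((((((PySem.Dict.empty).insert 0 "Gryffindor").insert 1 "Slytherin").insert 2 "Hufflepuff").insert 3 "Ravenclaw").get? (i : Int)).getD "")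
    = PySem.List.pyGetD ["Gryffindor", "Slytherin", "Hufflepuff", "Ravenclaw"]
        (if d > max c (max b a) then 3
         else if c > max b a then 2
         else if b > a then 1 else 0) "" := by
  by_cases h1 : a < b
  · by_cases h2 : b < c
    · by_cases h3 : c < d
      · have n0 : ¬ a = d := by omega
        have n1 : ¬ b = d := by omega
        have n2 : ¬ c = d := by omega
        have hm : (if d > max c (max b a) then (3:Int) else if c > max b a then 2 else if b > a then 1 else 0) = 3 := by
          split_ifs <;> omega
        rw [hm]
        simp only [PySem.List.max?, PySem.List.index?, PySem.List.pyGetD, PySem.List.pyGet?,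
          PySem.List.pyIdx?, List.idxOf?, List.findIdx?, PySem.Dict.get?, PySem.Dict.insert,
          PySem.Dict.empty]
        norm_num
        simp [h1, h2, h3, n0, n1, n2, List.findIdx?.go, List.find?]
      · have n0 : ¬ a = c := by omega
        have n1 : ¬ b = c := by omega
        have hm : (if d > max c (max b a) then (3:Int) else if c > max b a then 2 else if b > a then 1 else 0) = 2 := by
          split_ifs <;> omega
        rw [hm]
        simp only [PySem.List.max?, PySem.List.index?, PySem.List.pyGetD, PySem.List.pyGet?,
          PySem.List.pyIdx?, List.idxOf?, List.findIdx?, PySem.Dict.get?, PySem.Dict.insert,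
          PySem.Dict.empty]
        norm_num
        simp [h1, h2, h3, n0, n1, List.findIdx?.go, List.find?]
    · by_cases h3 : b < d
      · have n0 : ¬ a = d := by omega
        have n1 : ¬ b = d := by omega
        have n2 : ¬ c = d := by omega
        have hm : (if d > max c (max b a) then (3:Int) else if c > max b a then 2 else if b > a then 1 else 0) = 3 := by
          split_ifs <;> omega
        rw [hm]
        simp only [PySem.List.max?, PySem.List.index?, PySem.List.pyGetD, PySem.List.pyGet?,
          PySem.List.pyIdx?, List.idxOf?, List.findIdx?, PySem.Dict.get?, PySem.Dict.insert,
          PySem.Dict.empty]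
        norm_num
        simp [h1, h2, h3, n0, n1, n2, List.findIdx?.go, List.find?]
      · have n0 : ¬ a = b := by omega
        have hm : (if d > max c (max b a) then (3:Int) else if c > max b a then 2 else if b > a then 1 else 0) = 1 := by
          split_ifs <;> omega
        rw [hm]
        simp only [PySem.List.max?, PySem.List.index?, PySem.List.pyGetD, PySem.List.pyGet?,
          PySem.List.pyIdx?, List.idxOf?, List.findIdx?, PySem.Dict.get?, PySem.Dict.insert,
          PySem.Dict.empty]
        norm_num
        simp [h1, h2, h3, n0, List.findIdx?.go, List.find?]
  · by_cases h2 : a < c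
    · by_cases h3 : c < d
      · have n0 : ¬ a = d := by omega
        have n1 : ¬ b = d := by omega
        have n2 : ¬ c = d := by omega
        have hm : (if d > max c (max b a) then (3:Int) else if c > max b a then 2 else if b > a then 1 else 0) = 3 := by
          split_ifs <;> omega
        rw [hm]
        simp only [PySem.List.max?, PySem.List.index?, PySem.List.pyGetD, PySem.List.pyGet?,
          PySem.List.pyIdx?, List.idxOf?, List.findIdx?, PySem.Dict.get?, PySem.Dict.insert,
          PySem.Dict.empty]
        norm_num
        simp [h1, h2, h3, n0, n1, n2, List.findIdx?.go, List.find?]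
      · have n0 : ¬ a = c := by omega
        have n1 : ¬ b = c := by omega
        have hm : (if d > max c (max b a) then (3:Int) else if c > max b a then 2 else if b > a then 1 else 0) = 2 := by
          split_ifs <;> omega
        rw [hm]
        simp only [PySem.List.max?, PySem.List.index?, PySem.List.pyGetD, PySem.List.pyGet?,
          PySem.List.pyIdx?, List.idxOf?, List.findIdx?, PySem.Dict.get?, PySem.Dict.insert,
          PySem.Dict.empty]
        norm_num
        simp [h1, h2, h3, n0, n1, List.findIdx?.go, List.find?]
    · by_cases h3 : a < d
      · have n0 : ¬ a = d := by omega
        have n1 : ¬ b = d := by omega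
        have n2 : ¬ c = d := by omega
        have hm : (if d > max c (max b a) then (3:Int) else if c > max b a then 2 else if b > a then 1 else 0) = 3 := by
          split_ifs <;> omega
        rw [hm]
        simp only [PySem.List.max?, PySem.List.index?, PySem.List.pyGetD, PySem.List.pyGet?,
          PySem.List.pyIdx?, List.idxOf?, List.findIdx?, PySem.Dict.get?, PySem.Dict.insert,
          PySem.Dict.empty]
        norm_num
        simp [h1, h2, h3, n0, n1, n2, List.findIdx?.go, List.find?]
      · have hm : (if d > max c (max b a) then (3:Int) else if c > max b a then 2 else if b > a then 1 else 0) = 0 := by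
          split_ifs <;> omega
        rw [hm]
        simp only [PySem.List.max?, PySem.List.index?, PySem.List.pyGetD, PySem.List.pyGet?,
          PySem.List.pyIdx?, List.idxOf?, List.findIdx?, PySem.Dict.get?, PySem.Dict.insert,
          PySem.Dict.empty]
        norm_num
        simp [h1, h2, h3, List.findIdx?.go, List.find?]

-- ===== VERDICT (by name: the statement is the Claim_ definition above) =====
theorem logica_spec : Claim_equal_logica := by
  intro resultados _
  unfold Spec_logica logica logica_alt
  simp only [logica_fold_counts, zero_add, sorted_filter_blocks, blocks_fst]
  exact tail_eq (resultados.count 0) (resultados.count 1) (resultados.count 2) (resultados.count 3)
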